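-- pv_equiv track=rewrite | github.com/yinzanxia/dna_info_process | GUI/MyUtils.py | getGrowLimitWithDoorOrWindowInWall
-- ===== SOURCE A (Python) =====
-- def getGrowLimitWithDoorOrWindowInWall(x, y, door_range, direction, wall_min, wall_max):
--     min_left_dist = 10000000
--     min_right_dist = 10000000
--
--     if direction == 0:
--         x_min = wall_min
--         x_max = wall_max
--         for i in range(len(door_range['x'])):
--             tmp = door_range['x'][i]
--
--             if tmp[0] < x and tmp[1] > x:
--                 return -1, -1
--
--             if tmp[1] < x:
--                 if x - tmp[1] < min_left_dist:
--                     min_left_dist = x - tmp[1]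
--                     x_min = tmp[1]
--
--             if tmp[0] > x:
--                 if tmp[0] - x < min_right_dist:
--                     min_right_dist = tmp[0] - x
--                     x_max = tmp[0]
--         return x_min, x_max
--
--     min_top_dist = 1000000
--     min_bottom_dist = 1000000
--     if direction == 1:
--         y_min = wall_min
--         y_max = wall_max
--         for i in range(len(door_range['y'])):
--             tmp = door_range['y'][i]
--
--             if tmp[0] < y and tmp[1] > y:
--                 return -1, -1
--
--             if tmp[1] < y:
--                 if y - tmp[1] < min_bottom_dist:
--                     min_bottom_dist = y - tmp[1]
--                     y_min = tmp[1]
--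
--             if tmp[0] > y:
--                 if tmp[0] - y < min_top_dist:
--                     min_top_dist = tmp[0] - y
--                     y_max = tmp[0]
--         return y_min, y_max
--
--
--     return -1, -1
-- ===== SOURCE B (Python) =====
-- def getGrowLimitWithDoorOrWindowInWall(x, y, door_range, direction, wall_min, wall_max):
--     if direction == 0:
--         p, key = x, 'x'
--     elif direction == 1:
--         p, key = y, 'y'
--     else:
--         return -1, -1
--     ranges = door_range[key]
--     if any(lo < p < hi for lo, hi in ranges):
--         return -1, -1
--     lower = max((hi for lo, hi in ranges if hi < p), default=wall_min)
--     upper = min((lo for lo, hi in ranges if lo > p), default=wall_max)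
--     return lower, upper
-- ===== Notes on version B (the rewrite author's own statement) =====
-- stated objective: simpler
-- what changed: Replaces the running-minimum-distance state machine (four mutable distance/bound variables updated per element) by one containment scan plus direct extrema: lower = max of interval tops below the point, upper = min of interval bottoms above it, with the wall bounds as defaults; this also removes A's hard-coded distance caps.
-- intended difference: When the nearest flanking door boundary lies at distance >= 10**7 (direction 0) or >= 10**6 (direction 1) from the point, A's distance tracker never updates (its initial sentinel is smaller) and A silently returns the wall bound instead of that boundary; B returns the actual nearest boundary, which is the intended grow limit. — e.g. on getGrowLimitWithDoorOrWindowInWall(10000000, 0, [("x", [(-5, 0)])], 0, -100, 100): A returns (-100, 100), B returns (0, 100)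
import Mathlib
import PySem

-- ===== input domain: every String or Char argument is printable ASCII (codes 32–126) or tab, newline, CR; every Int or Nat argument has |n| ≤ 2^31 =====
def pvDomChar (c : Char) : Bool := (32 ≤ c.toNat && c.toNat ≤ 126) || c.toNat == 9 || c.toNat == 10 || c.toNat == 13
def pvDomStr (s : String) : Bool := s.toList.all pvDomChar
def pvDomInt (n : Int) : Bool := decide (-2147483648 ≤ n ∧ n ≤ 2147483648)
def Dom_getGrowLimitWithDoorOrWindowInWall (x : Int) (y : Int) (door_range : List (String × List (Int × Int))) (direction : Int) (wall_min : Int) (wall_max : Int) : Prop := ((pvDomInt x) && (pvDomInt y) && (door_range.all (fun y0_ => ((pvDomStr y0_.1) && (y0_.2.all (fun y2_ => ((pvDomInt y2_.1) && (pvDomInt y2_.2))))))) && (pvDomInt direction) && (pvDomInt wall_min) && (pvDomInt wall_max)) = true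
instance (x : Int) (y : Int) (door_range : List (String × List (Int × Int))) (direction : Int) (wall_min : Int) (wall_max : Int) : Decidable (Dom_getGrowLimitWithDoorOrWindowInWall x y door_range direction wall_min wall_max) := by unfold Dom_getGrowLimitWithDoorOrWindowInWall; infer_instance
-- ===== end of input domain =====

-- B replaces A's running-minimum-distance state machine by a containment scan plus direct
-- extrema of the flanking boundaries (objective: simpler); B intentionally drops A's
-- hard-coded distance caps (10**7 / 10**6) — see D_ below.

-- ===== PORT A =====
-- door_range[key]: first matching key, none = KeyError (helper shared by both ports)
def pvRanges (door_range : List (String × List (Int × Int))) (k : String) : Option (List (Int × Int)) :=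
  (door_range.find? (fun kv => kv.1 == k)).map (fun kv => kv.2)

-- A's per-element loop: early return (-1,-1) on a containing interval, then the two
-- independent "update nearest boundary if strictly closer" conditionals.
def pvALoop (p : Int) : List (Int × Int) → Int → Int → Int → Int → Int × Int
  | [], _, vmin, _, vmax => (vmin, vmax)
  | t :: ts, dl, vmin, dr, vmax =>
    if t.1 < p ∧ t.2 > p then (-1, -1)
    else
      let s1 : Int × Int := if t.2 < p ∧ p - t.2 < dl then (p - t.2, t.2) else (dl, vmin)
      let s2 : Int × Int := if t.1 > p ∧ t.1 - p < dr then (t.1 - p, t.1) else (dr, vmax)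
      pvALoop p ts s1.1 s1.2 s2.1 s2.2

def getGrowLimitWithDoorOrWindowInWall (x : Int) (y : Int) (door_range : List (String × List (Int × Int))) (direction : Int) (wall_min : Int) (wall_max : Int) : Int × Int :=
  if direction = 0 then
    -- door_range['x'] (KeyError excluded by Pre_)
    match pvRanges door_range "x" with
    | some L => pvALoop x L 10000000 wall_min 10000000 wall_max
    | none => (-1, -1)
  else if direction = 1 then
    match pvRanges door_range "y" with
    | some L => pvALoop y L 1000000 wall_min 1000000 wall_max
    | none => (-1, -1)
  else (-1, -1)

-- ===== PORT B =====
def pvFlank (p wmin wmax : Int) (rs : List (Int × Int)) : Int × Int :=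
  if rs.any (fun t => decide (t.1 < p ∧ p < t.2)) then (-1, -1)
  else
    ((PySem.List.max? ((rs.filter (fun t => decide (t.2 < p))).map (fun t => t.2)) (fun y => y)).getD wmin,
     (PySem.List.min? ((rs.filter (fun t => decide (p < t.1))).map (fun t => t.1)) (fun y => y)).getD wmax)

def getGrowLimitWithDoorOrWindowInWall_alt (x : Int) (y : Int) (door_range : List (String × List (Int × Int))) (direction : Int) (wall_min : Int) (wall_max : Int) : Int × Int :=
  if direction = 0 then
    match pvRanges door_range "x" with
    | some L => pvFlank x wall_min wall_max L
    | none => (-1, -1)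
  else if direction = 1 then
    match pvRanges door_range "y" with
    | some L => pvFlank y wall_min wall_max L
    | none => (-1, -1)
  else (-1, -1)

-- ===== PRECONDITION & SPEC =====
-- Pre_ excludes only the inputs on which A raises KeyError: direction 0 with no 'x' key,
-- direction 1 with no 'y' key.
def Pre_getGrowLimitWithDoorOrWindowInWall (x : Int) (y : Int) (door_range : List (String × List (Int × Int))) (direction : Int) (wall_min : Int) (wall_max : Int) : Prop :=
  (direction = 0 → (pvRanges door_range "x").isSome = true) ∧
  (direction = 1 → (pvRanges door_range "y").isSome = true)
instance (x : Int) (y : Int) (door_range : List (String × List (Int × Int))) (direction : Int) (wall_min : Int) (wall_max : Int) : Decidable (Pre_getGrowLimitWithDoorOrWindowInWall x y door_range direction wall_min wall_max) := by unfold Pre_getGrowLimitWithDoorOrWindowInWall; infer_instance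

def pvWitness_getGrowLimitWithDoorOrWindowInWall : Int × Int × (List (String × List (Int × Int))) × Int × Int × Int :=
  (5, 0, [("x", [(1, 4), (7, 9)])], 0, -100, 100)

-- D_ helpers (closed-form conditions on the input; they never compute either output).
-- pvFar p cap w f L: the nearest boundary f t below p (maximal among those < p) lies ≥ cap
-- away from p and differs from the wall bound w; the high side is the same condition
-- mirrored through negation (pvFar (-p) cap (-wall_max) (fun t => -t.1)).
abbrev pvFar (p cap w : Int) (f : Int × Int → Int) (L : List (Int × Int)) : Prop :=
  ∃ t ∈ L, cap ≤ p - f t ∧ f t ≠ w ∧ ∀ u ∈ L, f u < p → f u ≤ f t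
abbrev pvDS (p cap wmin wmax : Int) (o : Option (List (Int × Int))) : Prop :=
  ∃ L ∈ o, (∀ t ∈ L, p ≤ t.1 ∨ t.2 ≤ p) ∧ (pvFar p cap wmin (·.2) L ∨ pvFar (-p) cap (-wmax) (-·.1) L)

-- When the nearest flanking door boundary lies at distance ≥ 10^7 (direction 0) resp. 10^6
-- (direction 1) from the point, A's strict running-minimum (seeded with that sentinel) never
-- updates and A silently returns the wall bound; B returns the actual nearest boundary,
-- which is the intended grow limit.
def D_getGrowLimitWithDoorOrWindowInWall (x : Int) (y : Int) (door_range : List (String × List (Int × Int))) (direction : Int) (wall_min : Int) (wall_max : Int) : Prop :=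
  direction = 0 ∧ pvDS x 10000000 wall_min wall_max (pvRanges door_range "x") ∨
  direction = 1 ∧ pvDS y 1000000 wall_min wall_max (pvRanges door_range "y")
instance (x : Int) (y : Int) (door_range : List (String × List (Int × Int))) (direction : Int) (wall_min : Int) (wall_max : Int) : Decidable (D_getGrowLimitWithDoorOrWindowInWall x y door_range direction wall_min wall_max) := by unfold D_getGrowLimitWithDoorOrWindowInWall; infer_instance

def Spec_getGrowLimitWithDoorOrWindowInWall (x : Int) (y : Int) (door_range : List (String × List (Int × Int))) (direction : Int) (wall_min : Int) (wall_max : Int) (out : Int × Int) : Prop := ¬ D_getGrowLimitWithDoorOrWindowInWall x y door_range direction wall_min wall_max → out = getGrowLimitWithDoorOrWindowInWall_alt x y door_range direction wall_min wall_max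
instance (x : Int) (y : Int) (door_range : List (String × List (Int × Int))) (direction : Int) (wall_min : Int) (wall_max : Int) (out : Int × Int) : Decidable (Spec_getGrowLimitWithDoorOrWindowInWall x y door_range direction wall_min wall_max out) := by unfold Spec_getGrowLimitWithDoorOrWindowInWall; infer_instance

def pvDiffWitness_getGrowLimitWithDoorOrWindowInWall : Int × Int × (List (String × List (Int × Int))) × Int × Int × Int :=
  (10000000, 0, [("x", [(-5, 0)])], 0, -100, 100)
def pvDiffWitnessOut_getGrowLimitWithDoorOrWindowInWall : (Int × Int) × (Int × Int) := ((-100, 100), (0, 100))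

-- ===== CLAIM (what is proved, stated in full; the proofs are below) =====
def Claim_unchanged_getGrowLimitWithDoorOrWindowInWall : Prop := ∀ (x : Int) (y : Int) (door_range : List (String × List (Int × Int))) (direction : Int) (wall_min : Int) (wall_max : Int), Dom_getGrowLimitWithDoorOrWindowInWall x y door_range direction wall_min wall_max → Pre_getGrowLimitWithDoorOrWindowInWall x y door_range direction wall_min wall_max → Spec_getGrowLimitWithDoorOrWindowInWall x y door_range direction wall_min wall_max (getGrowLimitWithDoorOrWindowInWall x y door_range direction wall_min wall_max)
def Claim_changed_getGrowLimitWithDoorOrWindowInWall : Prop := Dom_getGrowLimitWithDoorOrWindowInWall (pvDiffWitness_getGrowLimitWithDoorOrWindowInWall.1) (pvDiffWitness_getGrowLimitWithDoorOrWindowInWall.2.1) (pvDiffWitness_getGrowLimitWithDoorOrWindowInWall.2.2.1) (pvDiffWitness_getGrowLimitWithDoorOrWindowInWall.2.2.2.1) (pvDiffWitness_getGrowLimitWithDoorOrWindowInWall.2.2.2.2.1) (pvDiffWitness_getGrowLimitWithDoorOrWindowInWall.2.2.2.2.2) ∧ Pre_getGrowLimitWithDoorOrWindowInWall (pvDiffWitness_getGrowLimitWithDoorOrWindowInWall.1)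 (pvDiffWitness_getGrowLimitWithDoorOrWindowInWall.2.1) (pvDiffWitness_getGrowLimitWithDoorOrWindowInWall.2.2.1) (pvDiffWitness_getGrowLimitWithDoorOrWindowInWall.2.2.2.1) (pvDiffWitness_getGrowLimitWithDoorOrWindowInWall.2.2.2.2.1) (pvDiffWitness_getGrowLimitWithDoorOrWindowInWall.2.2.2.2.2) ∧ D_getGrowLimitWithDoorOrWindowInWall (pvDiffWitness_getGrowLimitWithDoorOrWindowInWall.1) (pvDiffWitness_getGrowLimitWithDoorOrWindowInWall.2.1) (pvDiffWitness_getGrowLimitWithDoorOrWindowInWall.2.2.1) (pvDiffWitness_getGrowLimitWithDoorOrWindowInWall.2.2.2.1) (pvDiffWitness_getGrowLimitWithDoorOrWindowInWall.2.2.2.2.1) (pvDiffWitness_getGrowLimitWithDoorOrWindowInWall.2.2.2.2.2) ∧ getGrowLimitWithDoorOrWindowInWall (pvDiffWitness_getGrowLimitWithDoorOrWindowInWall.1) (pvDiffWitness_getGrowLimitWithDoorOrWindowInWall.2.1) (pvDiffWitness_getGrowLimitWithDoorOrWindowInWall.2.2.1) (pvDiffWitness_getGrowLimitWithDoorOrWindowInWall.2.2.2.1)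 (pvDiffWitness_getGrowLimitWithDoorOrWindowInWall.2.2.2.2.1) (pvDiffWitness_getGrowLimitWithDoorOrWindowInWall.2.2.2.2.2) = pvDiffWitnessOut_getGrowLimitWithDoorOrWindowInWall.1 ∧ getGrowLimitWithDoorOrWindowInWall_alt (pvDiffWitness_getGrowLimitWithDoorOrWindowInWall.1) (pvDiffWitness_getGrowLimitWithDoorOrWindowInWall.2.1) (pvDiffWitness_getGrowLimitWithDoorOrWindowInWall.2.2.1) (pvDiffWitness_getGrowLimitWithDoorOrWindowInWall.2.2.2.1) (pvDiffWitness_getGrowLimitWithDoorOrWindowInWall.2.2.2.2.1) (pvDiffWitness_getGrowLimitWithDoorOrWindowInWall.2.2.2.2.2) = pvDiffWitnessOut_getGrowLimitWithDoorOrWindowInWall.2 ∧ pvDiffWitnessOut_getGrowLimitWithDoorOrWindowInWall.1 ≠ pvDiffWitnessOut_getGrowLimitWithDoorOrWindowInWall.2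
def Claim_exact_getGrowLimitWithDoorOrWindowInWall : Prop := ∀ (x : Int) (y : Int) (door_range : List (String × List (Int × Int))) (direction : Int) (wall_min : Int) (wall_max : Int), Dom_getGrowLimitWithDoorOrWindowInWall x y door_range direction wall_min wall_max → Pre_getGrowLimitWithDoorOrWindowInWall x y door_range direction wall_min wall_max → D_getGrowLimitWithDoorOrWindowInWall x y door_range direction wall_min wall_max → getGrowLimitWithDoorOrWindowInWall x y door_range direction wall_min wall_max ≠ getGrowLimitWithDoorOrWindowInWall_alt x y door_range direction wall_min wall_max

-- ===== LEMMAS AND PROOFS =====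

-- proof-side decompositions of A's loop
def pvLf (p : Int) : List (Int × Int) → Int → Int → Int
  | [], _, vmin => vmin
  | t :: ts, dl, vmin => if t.2 < p ∧ p - t.2 < dl then pvLf p ts (p - t.2) t.2 else pvLf p ts dl vmin

def pvRf (p : Int) : List (Int × Int) → Int → Int → Int
  | [], _, vmax => vmax
  | t :: ts, dr, vmax => if t.1 > p ∧ t.1 - p < dr then pvRf p ts (t.1 - p) t.1 else pvRf p ts dr vmax

theorem pvALoop_split (p : Int) (ts : List (Int × Int)) : ∀ dl vmin dr vmax,
    pvALoop p ts dl vmin dr vmax =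
      if ts.any (fun t => decide (t.1 < p ∧ p < t.2)) then (-1, -1)
      else (pvLf p ts dl vmin, pvRf p ts dr vmax) := by
  induction ts with
  | nil => intro dl vmin dr vmax; simp [pvALoop, pvLf, pvRf]
  | cons t ts ih =>
    intro dl vmin dr vmax
    by_cases hc : t.1 < p ∧ p < t.2
    · simp [pvALoop, hc]
    · simp only [pvALoop, pvLf, pvRf, List.any_cons, gt_iff_lt]
      rw [if_neg hc]
      simp only [decide_eq_true_eq, hc, false_or]
      by_cases h1 : t.2 < p ∧ p - t.2 < dl <;>
        by_cases h2 : p < t.1 ∧ t.1 - p < dr <;>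
          simp only [h1, h2, if_true, if_false, ih, decide_false, Bool.false_or,
            decide_true, if_pos, if_neg, not_false_iff, not_true] <;> simp [hc]

theorem pvMaxFilter (l : List Int) (a : Int) :
    (PySem.List.max? (l.filter (fun h => decide (a < h))) (fun y => y)).getD a = l.foldl max a := by
  have hcons := PySem.List.max?_id_cons a l
  have hmem : l.foldl max a ∈ a :: l := PySem.List.max?_mem hcons
  have hmax : ∀ y ∈ a :: l, y ≤ l.foldl max a := PySem.List.max?_isMax hcons
  cases h : l.filter (fun h => decide (a < h)) with
  | nil =>
    have hall : ∀ h' ∈ l, ¬(a < h') := by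
      intro h' hh'
      have := List.filter_eq_nil_iff.mp h h' hh'
      simpa using this
    have hfa : l.foldl max a = a := by
      rcases List.mem_cons.mp hmem with h0 | h0
      · exact h0
      · exact le_antisymm (not_lt.mp (hall _ h0)) (hmax a (List.mem_cons_self ..))
    have hn : PySem.List.max? ([] : List Int) (fun y => y) = none :=
      (PySem.List.max?_eq_none_iff _ _).mpr rfl
    rw [hn, hfa]; rfl
  | cons c rest =>
    have hc2 := PySem.List.max?_id_cons c rest
    have hmem' : rest.foldl max c ∈ c :: rest := PySem.List.max?_mem hc2
    have hmax' : ∀ y ∈ c :: rest, y ≤ rest.foldl max c := PySem.List.max?_isMax hc2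
    rw [hc2]
    show rest.foldl max c = l.foldl max a
    have hMf : rest.foldl max c ∈ l.filter (fun h => decide (a < h)) := h ▸ hmem'
    obtain ⟨hMl, hMa⟩ := List.mem_filter.mp hMf
    have hMa : a < rest.foldl max c := by simpa using hMa
    apply le_antisymm
    · exact hmax _ (List.mem_cons_of_mem _ hMl)
    · rcases List.mem_cons.mp hmem with h0 | h0
      · rw [h0]; exact le_of_lt hMa
      · by_cases hlt : a < l.foldl max a
        · have hin : l.foldl max a ∈ c :: rest := by
            rw [← h]; exact List.mem_filter.mpr ⟨h0, by simpa⟩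
          exact hmax' _ hin
        · have : l.foldl max a = a :=
            le_antisymm (not_lt.mp hlt) (hmax a (List.mem_cons_self ..))
          rw [this]; exact le_of_lt hMa

theorem pvMinFilter (l : List Int) (a : Int) :
    (PySem.List.min? (l.filter (fun h => decide (h < a))) (fun y => y)).getD a = l.foldl min a := by
  have hcons := PySem.List.min?_id_cons a l
  have hmem : l.foldl min a ∈ a :: l := PySem.List.min?_mem hcons
  have hmin : ∀ y ∈ a :: l, l.foldl min a ≤ y := PySem.List.min?_isMin hcons
  cases h : l.filter (fun h => decide (h < a)) with
  | nil =>
    have hall : ∀ h' ∈ l, ¬(h' < a) := by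
      intro h' hh'
      have := List.filter_eq_nil_iff.mp h h' hh'
      simpa using this
    have hfa : l.foldl min a = a := by
      rcases List.mem_cons.mp hmem with h0 | h0
      · exact h0
      · exact le_antisymm (hmin a (List.mem_cons_self ..)) (not_lt.mp (hall _ h0))
    have hn : PySem.List.min? ([] : List Int) (fun y => y) = none :=
      (PySem.List.min?_eq_none_iff _ _).mpr rfl
    rw [hn, hfa]; rfl
  | cons c rest =>
    have hc2 := PySem.List.min?_id_cons c rest
    have hmem' : rest.foldl min c ∈ c :: rest := PySem.List.min?_mem hc2
    have hmin' : ∀ y ∈ c :: rest, rest.foldl min c ≤ y := PySem.List.min?_isMin hc2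
    rw [hc2]
    show rest.foldl min c = l.foldl min a
    have hMf : rest.foldl min c ∈ l.filter (fun h => decide (h < a)) := h ▸ hmem'
    obtain ⟨hMl, hMa⟩ := List.mem_filter.mp hMf
    have hMa : rest.foldl min c < a := by simpa using hMa
    apply le_antisymm
    · rcases List.mem_cons.mp hmem with h0 | h0
      · rw [h0]; exact le_of_lt hMa
      · by_cases hlt : l.foldl min a < a
        · have hin : l.foldl min a ∈ c :: rest := by
            rw [← h]; exact List.mem_filter.mpr ⟨h0, by simpa⟩
          exact hmin' _ hin
        · have : l.foldl min a = a :=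
            le_antisymm (hmin a (List.mem_cons_self ..)) (not_lt.mp hlt)
          rw [this]; exact le_of_lt hMa
    · exact hmin _ (List.mem_cons_of_mem _ hMl)

theorem pvLf_char (p : Int) (ts : List (Int × Int)) : ∀ dl vmin,
    pvLf p ts dl vmin =
      (PySem.List.max? ((ts.filter (fun t => decide (t.2 < p ∧ p - t.2 < dl))).map (fun t => t.2)) (fun y => y)).getD vmin := by
  induction ts with
  | nil =>
    intro dl vmin
    have hn : PySem.List.max? ([] : List Int) (fun y => y) = none :=
      (PySem.List.max?_eq_none_iff _ _).mpr rfl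
    simp [pvLf, hn]
  | cons t ts ih =>
    intro dl vmin
    by_cases hq : t.2 < p ∧ p - t.2 < dl
    · rw [pvLf, if_pos hq, ih]
      have hmap : (ts.filter (fun t' => decide (t'.2 < p ∧ p - t'.2 < (p - t.2)))).map (fun t => t.2)
          = ((ts.filter (fun t' => decide (t'.2 < p ∧ p - t'.2 < dl))).map (fun t => t.2)).filter
              (fun h => decide (t.2 < h)) := by
        rw [List.filter_map, List.filter_filter]
        apply congrArg
        apply List.filter_congr
        intro t' _
        obtain ⟨hq1, hq2⟩ := hq
        simp only [Function.comp]
        rw [Bool.eq_iff_iff]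
        simp only [Bool.and_eq_true, decide_eq_true_eq]
        omega
      rw [hmap, pvMaxFilter]
      rw [List.filter_cons_of_pos (by simpa using hq), List.map_cons,
        PySem.List.max?_id_cons]
      rfl
    · rw [pvLf, if_neg hq, ih, List.filter_cons_of_neg (by simpa using hq)]

theorem pvRf_char (p : Int) (ts : List (Int × Int)) : ∀ dr vmax,
    pvRf p ts dr vmax =
      (PySem.List.min? ((ts.filter (fun t => decide (t.1 > p ∧ t.1 - p < dr))).map (fun t => t.1)) (fun y => y)).getD vmax := by
  induction ts with
  | nil =>
    intro dr vmax
    have hn : PySem.List.min? ([] : List Int) (fun y => y) = none :=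
      (PySem.List.min?_eq_none_iff _ _).mpr rfl
    simp [pvRf, hn]
  | cons t ts ih =>
    intro dr vmax
    by_cases hq : t.1 > p ∧ t.1 - p < dr
    · rw [pvRf, if_pos hq, ih]
      have hmap : (ts.filter (fun t' => decide (t'.1 > p ∧ t'.1 - p < (t.1 - p)))).map (fun t => t.1)
          = ((ts.filter (fun t' => decide (t'.1 > p ∧ t'.1 - p < dr))).map (fun t => t.1)).filter
              (fun h => decide (h < t.1)) := by
        rw [List.filter_map, List.filter_filter]
        apply congrArg
        apply List.filter_congr
        intro t' _
        obtain ⟨hq1, hq2⟩ := hq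
        simp only [Function.comp]
        rw [Bool.eq_iff_iff]
        simp only [Bool.and_eq_true, decide_eq_true_eq]
        omega
      rw [hmap, pvMinFilter]
      rw [List.filter_cons_of_pos (by simpa using hq), List.map_cons,
        PySem.List.min?_id_cons]
      rfl
    · rw [pvRf, if_neg hq, ih, List.filter_cons_of_neg (by simpa using hq)]

-- the A-side candidate list is the B-side one filtered by the cap
theorem pvSplitLow (p cap : Int) (L : List (Int × Int)) :
    (L.filter (fun t => decide (t.2 < p ∧ p - t.2 < cap))).map (fun t => t.2)
      = ((L.filter (fun t => decide (t.2 < p))).map (fun t => t.2)).filter (fun h => decide (p - h < cap)) := by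
  rw [List.filter_map, List.filter_filter]
  apply congrArg
  apply List.filter_congr
  intro t' _
  simp only [Function.comp]
  rw [Bool.eq_iff_iff]
  simp only [Bool.and_eq_true, decide_eq_true_eq]
  omega

theorem pvSplitHigh (p cap : Int) (L : List (Int × Int)) :
    (L.filter (fun t => decide (t.1 > p ∧ t.1 - p < cap))).map (fun t => t.1)
      = ((L.filter (fun t => decide (p < t.1))).map (fun t => t.1)).filter (fun h => decide (h - p < cap)) := by
  rw [List.filter_map, List.filter_filter]
  apply congrArg
  apply List.filter_congr
  intro t' _
  simp only [Function.comp]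
  rw [Bool.eq_iff_iff]
  simp only [Bool.and_eq_true, decide_eq_true_eq]
  omega

theorem pvLower_eq (p cap wmin : Int) (L : List (Int × Int))
    (hD : ¬ pvFar p cap wmin (fun t => t.2) L) :
    (PySem.List.max? ((L.filter (fun t => decide (t.2 < p ∧ p - t.2 < cap))).map (fun t => t.2)) (fun y => y)).getD wmin
      = (PySem.List.max? ((L.filter (fun t => decide (t.2 < p))).map (fun t => t.2)) (fun y => y)).getD wmin := by
  rw [pvSplitLow]
  cases hb : (L.filter (fun t => decide (t.2 < p))).map (fun t => t.2) with
  | nil => rfl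
  | cons c rest =>
    have hcons := PySem.List.max?_id_cons c rest
    have hmem : rest.foldl max c ∈ c :: rest := PySem.List.max?_mem hcons
    have hmax : ∀ y ∈ c :: rest, y ≤ rest.foldl max c := PySem.List.max?_isMax hcons
    rw [hcons]
    by_cases hcap : p - rest.foldl max c < cap
    · have hMf : rest.foldl max c ∈ (c :: rest).filter (fun h => decide (p - h < cap)) :=
        List.mem_filter.mpr ⟨hmem, by simpa⟩
      cases hla : (c :: rest).filter (fun h => decide (p - h < cap)) with
      | nil => rw [hla] at hMf; cases hMf
      | cons d ds =>
        rw [hla] at hMf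
        have hc2 := PySem.List.max?_id_cons d ds
        have hmem' : ds.foldl max d ∈ d :: ds := PySem.List.max?_mem hc2
        have hmax' : ∀ y ∈ d :: ds, y ≤ ds.foldl max d := PySem.List.max?_isMax hc2
        rw [hc2]
        have h1 : ds.foldl max d ≤ rest.foldl max c := by
          have : ds.foldl max d ∈ (c :: rest).filter (fun h => decide (p - h < cap)) :=
            hla ▸ hmem'
          exact hmax _ (List.mem_filter.mp this).1
        have h2 : rest.foldl max c ≤ ds.foldl max d := hmax' _ hMf
        simp [le_antisymm h1 h2]
    · have hla : (c :: rest).filter (fun h => decide (p - h < cap)) = [] := by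
        apply List.filter_eq_nil_iff.mpr
        intro h hh
        have := hmax h hh
        simp only [decide_eq_true_eq]
        omega
      rw [hla]
      have hM : rest.foldl max c = wmin := by
        by_contra hne
        apply hD
        have hMlb : rest.foldl max c ∈ (L.filter (fun t => decide (t.2 < p))).map (fun t => t.2) :=
          hb ▸ hmem
        obtain ⟨t, htf, hts⟩ := List.mem_map.mp hMlb
        obtain ⟨htL, htp⟩ := List.mem_filter.mp htf
        have htp : t.2 < p := by simpa using htp
        have hts' : t.2 = rest.foldl max c := hts
        refine ⟨t, htL, ?_, ?_, ?_⟩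
        · show cap ≤ p - t.2
          omega
        · show t.2 ≠ wmin
          rw [hts']; exact hne
        · intro t' ht' ht'p
          show t'.2 ≤ t.2
          have ht'p' : t'.2 < p := ht'p
          have hmem2 : t'.2 ∈ (L.filter (fun t => decide (t.2 < p))).map (fun t => t.2) :=
            List.mem_map.mpr ⟨t', List.mem_filter.mpr ⟨ht', by simpa⟩, rfl⟩
          have := hmax _ (hb ▸ hmem2)
          omega
      have hn : PySem.List.max? ([] : List Int) (fun y => y) = none :=
        (PySem.List.max?_eq_none_iff _ _).mpr rfl
      rw [hn, hM]
      rfl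

theorem pvUpper_eq (p cap wmax : Int) (L : List (Int × Int))
    (hD : ¬ pvFar (-p) cap (-wmax) (fun t => -t.1) L) :
    (PySem.List.min? ((L.filter (fun t => decide (t.1 > p ∧ t.1 - p < cap))).map (fun t => t.1)) (fun y => y)).getD wmax
      = (PySem.List.min? ((L.filter (fun t => decide (p < t.1))).map (fun t => t.1)) (fun y => y)).getD wmax := by
  rw [pvSplitHigh]
  cases hb : (L.filter (fun t => decide (p < t.1))).map (fun t => t.1) with
  | nil => rfl
  | cons c rest =>
    have hcons := PySem.List.min?_id_cons c rest
    have hmem : rest.foldl min c ∈ c :: rest := PySem.List.min?_mem hcons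
    have hmin : ∀ y ∈ c :: rest, rest.foldl min c ≤ y := PySem.List.min?_isMin hcons
    rw [hcons]
    by_cases hcap : rest.foldl min c - p < cap
    · have hMf : rest.foldl min c ∈ (c :: rest).filter (fun h => decide (h - p < cap)) :=
        List.mem_filter.mpr ⟨hmem, by simpa⟩
      cases hla : (c :: rest).filter (fun h => decide (h - p < cap)) with
      | nil => rw [hla] at hMf; cases hMf
      | cons d ds =>
        rw [hla] at hMf
        have hc2 := PySem.List.min?_id_cons d ds
        have hmem' : ds.foldl min d ∈ d :: ds := PySem.List.min?_mem hc2
        have hmin' : ∀ y ∈ d :: ds, ds.foldl min d ≤ y := PySem.List.min?_isMin hc2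
        rw [hc2]
        have h1 : rest.foldl min c ≤ ds.foldl min d := by
          have : ds.foldl min d ∈ (c :: rest).filter (fun h => decide (h - p < cap)) :=
            hla ▸ hmem'
          exact hmin _ (List.mem_filter.mp this).1
        have h2 : ds.foldl min d ≤ rest.foldl min c := hmin' _ hMf
        simp [le_antisymm h2 h1]
    · have hla : (c :: rest).filter (fun h => decide (h - p < cap)) = [] := by
        apply List.filter_eq_nil_iff.mpr
        intro h hh
        have := hmin h hh
        simp only [decide_eq_true_eq]
        omega
      rw [hla]
      have hM : rest.foldl min c = wmax := by
        by_contra hne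
        apply hD
        have hMlb : rest.foldl min c ∈ (L.filter (fun t => decide (p < t.1))).map (fun t => t.1) :=
          hb ▸ hmem
        obtain ⟨t, htf, hts⟩ := List.mem_map.mp hMlb
        obtain ⟨htL, htp⟩ := List.mem_filter.mp htf
        have htp : p < t.1 := by simpa using htp
        have hts' : t.1 = rest.foldl min c := hts
        refine ⟨t, htL, ?_, ?_, ?_⟩
        · show cap ≤ -p - -t.1
          omega
        · show -t.1 ≠ -wmax
          intro h
          exact hne (by omega)
        · intro t' ht' hlt
          show -t'.1 ≤ -t.1
          have hlt' : -t'.1 < -p := hlt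
          have hp' : p < t'.1 := by omega
          have hmem2 : t'.1 ∈ (L.filter (fun t => decide (p < t.1))).map (fun t => t.1) :=
            List.mem_map.mpr ⟨t', List.mem_filter.mpr ⟨ht', by simpa⟩, rfl⟩
          have := hmin _ (hb ▸ hmem2)
          omega
      have hn : PySem.List.min? ([] : List Int) (fun y => y) = none :=
        (PySem.List.min?_eq_none_iff _ _).mpr rfl
      rw [hn, hM]
      rfl


-- inside the far region: A's capped candidate list is empty while B's extremum survives
theorem pvLower_far (p cap wmin : Int) (L : List (Int × Int))
    (hcap : 0 < cap) (hf : pvFar p cap wmin (fun t => t.2) L) :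
    (PySem.List.max? ((L.filter (fun t => decide (t.2 < p ∧ p - t.2 < cap))).map (fun t => t.2)) (fun y => y)).getD wmin = wmin ∧
    (PySem.List.max? ((L.filter (fun t => decide (t.2 < p))).map (fun t => t.2)) (fun y => y)).getD wmin ≠ wmin := by
  obtain ⟨t, htL, ht2', ht3', ht4''⟩ := hf
  have ht2 : cap ≤ p - t.2 := ht2'
  have ht3 : t.2 ≠ wmin := ht3'
  have ht4' : ∀ t' ∈ L, t'.2 < p → t'.2 ≤ t.2 := fun u hu h => ht4'' u hu h
  have ht1 : t.2 < p := by omega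
  constructor
  · rw [pvSplitLow]
    have hla : ((L.filter (fun t => decide (t.2 < p))).map (fun t => t.2)).filter (fun h => decide (p - h < cap)) = [] := by
      apply List.filter_eq_nil_iff.mpr
      intro h hh
      obtain ⟨t', ht'f, ht's⟩ := List.mem_map.mp hh
      obtain ⟨ht'L, ht'p⟩ := List.mem_filter.mp ht'f
      have ht'p : t'.2 < p := by simpa using ht'p
      have hb1 := ht4' t' ht'L ht'p
      simp only [decide_eq_true_eq] at ht's ⊢
      omega
    rw [hla]
    rfl
  · have htmem : t.2 ∈ (L.filter (fun t => decide (t.2 < p))).map (fun t => t.2) :=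
      List.mem_map.mpr ⟨t, List.mem_filter.mpr ⟨htL, by simpa⟩, rfl⟩
    cases hb : (L.filter (fun t => decide (t.2 < p))).map (fun t => t.2) with
    | nil => rw [hb] at htmem; cases htmem
    | cons c rest =>
      rw [hb] at htmem
      have hcons := PySem.List.max?_id_cons c rest
      have hmem := PySem.List.max?_mem hcons
      have hmax := PySem.List.max?_isMax hcons
      rw [hcons]
      have hle : rest.foldl max c ≤ t.2 := by
        obtain ⟨t', ht'f, ht's⟩ := List.mem_map.mp (hb ▸ hmem)
        obtain ⟨ht'L, ht'p⟩ := List.mem_filter.mp ht'f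
        rw [← ht's]
        exact ht4' t' ht'L (by simpa using ht'p)
      have hge : t.2 ≤ rest.foldl max c := hmax _ htmem
      have heq2 : rest.foldl max c = t.2 := le_antisymm hle hge
      simpa [heq2] using ht3

theorem pvUpper_far (p cap wmax : Int) (L : List (Int × Int))
    (hcap : 0 < cap) (hf : pvFar (-p) cap (-wmax) (fun t => -t.1) L) :
    (PySem.List.min? ((L.filter (fun t => decide (t.1 > p ∧ t.1 - p < cap))).map (fun t => t.1)) (fun y => y)).getD wmax = wmax ∧
    (PySem.List.min? ((L.filter (fun t => decide (p < t.1))).map (fun t => t.1)) (fun y => y)).getD wmax ≠ wmax := by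
  obtain ⟨t, htL, h2', h3', h4'⟩ := hf
  have h2 : cap ≤ -p - -t.1 := h2'
  have ht1 : p < t.1 := by omega
  have ht2 : cap ≤ t.1 - p := by omega
  have ht3 : t.1 ≠ wmax := fun h => h3' (show -t.1 = -wmax by omega)
  have ht4' : ∀ t' ∈ L, p < t'.1 → t.1 ≤ t'.1 := by
    intro t' h hgt
    have h5 : -t'.1 ≤ -t.1 := h4' t' h (show -t'.1 < -p by omega)
    omega
  constructor
  · rw [pvSplitHigh]
    have hla : ((L.filter (fun t => decide (p < t.1))).map (fun t => t.1)).filter (fun h => decide (h - p < cap)) = [] := by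
      apply List.filter_eq_nil_iff.mpr
      intro h hh
      obtain ⟨t', ht'f, ht's⟩ := List.mem_map.mp hh
      obtain ⟨ht'L, ht'p⟩ := List.mem_filter.mp ht'f
      have ht'p : p < t'.1 := by simpa using ht'p
      have hb1 := ht4' t' ht'L ht'p
      simp only [decide_eq_true_eq] at ht's ⊢
      omega
    rw [hla]
    rfl
  · have htmem : t.1 ∈ (L.filter (fun t => decide (p < t.1))).map (fun t => t.1) :=
      List.mem_map.mpr ⟨t, List.mem_filter.mpr ⟨htL, by simpa⟩, rfl⟩
    cases hb : (L.filter (fun t => decide (p < t.1))).map (fun t => t.1) with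
    | nil => rw [hb] at htmem; cases htmem
    | cons c rest =>
      rw [hb] at htmem
      have hcons := PySem.List.min?_id_cons c rest
      have hmem := PySem.List.min?_mem hcons
      have hmin := PySem.List.min?_isMin hcons
      rw [hcons]
      have hge : t.1 ≤ rest.foldl min c := by
        obtain ⟨t', ht'f, ht's⟩ := List.mem_map.mp (hb ▸ hmem)
        obtain ⟨ht'L, ht'p⟩ := List.mem_filter.mp ht'f
        rw [← ht's]
        exact ht4' t' ht'L (by simpa using ht'p)
      have hle : rest.foldl min c ≤ t.1 := hmin _ htmem
      have heq2 : rest.foldl min c = t.1 := le_antisymm hle hge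
      simpa [heq2] using ht3

-- ===== VERDICT (by name: the statement is the Claim_ definition above) =====
theorem getGrowLimitWithDoorOrWindowInWall_spec : Claim_unchanged_getGrowLimitWithDoorOrWindowInWall := by
  intro x y dr direction wmin wmax hDom hPre
  unfold Spec_getGrowLimitWithDoorOrWindowInWall
  intro hnD
  unfold getGrowLimitWithDoorOrWindowInWall getGrowLimitWithDoorOrWindowInWall_alt
  by_cases h0 : direction = 0
  · rw [if_pos h0, if_pos h0]
    obtain ⟨L, hkv⟩ := Option.isSome_iff_exists.mp (hPre.1 h0)
    rw [hkv]
    show pvALoop x L 10000000 wmin 10000000 wmax = pvFlank x wmin wmax L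
    have hside : ¬ pvDS x 10000000 wmin wmax (pvRanges dr "x") := fun hs =>
      hnD (Or.inl ⟨h0, hs⟩)
    rw [pvALoop_split]
    unfold pvFlank
    by_cases hc : L.any (fun t => decide (t.1 < x ∧ x < t.2)) = true
    · rw [if_pos hc, if_pos hc]
    · rw [if_neg hc, if_neg hc]
      have hnc : ∀ t ∈ L, x ≤ t.1 ∨ t.2 ≤ x := by
        intro t ht
        by_contra hcontr
        push_neg at hcontr
        exact hc (List.any_eq_true.mpr ⟨t, ht, by simp; omega⟩)
      have hfl : ¬ pvFar x 10000000 wmin (fun t => t.2) L := fun hf =>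
        hside ⟨L, by rw [hkv]; rfl, hnc, Or.inl hf⟩
      have hfh : ¬ pvFar (-x) 10000000 (-wmax) (fun t => -t.1) L := fun hf =>
        hside ⟨L, by rw [hkv]; rfl, hnc, Or.inr hf⟩
      rw [pvLf_char, pvRf_char, pvLower_eq x 10000000 wmin L hfl,
        pvUpper_eq x 10000000 wmax L hfh]
  · by_cases h1 : direction = 1
    · rw [if_neg h0, if_pos h1, if_neg h0, if_pos h1]
      obtain ⟨L, hkv⟩ := Option.isSome_iff_exists.mp (hPre.2 h1)
      rw [hkv]
      show pvALoop y L 1000000 wmin 1000000 wmax = pvFlank y wmin wmax L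
      have hside : ¬ pvDS y 1000000 wmin wmax (pvRanges dr "y") := fun hs =>
        hnD (Or.inr ⟨h1, hs⟩)
      rw [pvALoop_split]
      unfold pvFlank
      by_cases hc : L.any (fun t => decide (t.1 < y ∧ y < t.2)) = true
      · rw [if_pos hc, if_pos hc]
      · rw [if_neg hc, if_neg hc]
        have hnc : ∀ t ∈ L, y ≤ t.1 ∨ t.2 ≤ y := by
          intro t ht
          by_contra hcontr
          push_neg at hcontr
          exact hc (List.any_eq_true.mpr ⟨t, ht, by simp; omega⟩)
        have hfl : ¬ pvFar y 1000000 wmin (fun t => t.2) L := fun hf =>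
          hside ⟨L, by rw [hkv]; rfl, hnc, Or.inl hf⟩
        have hfh : ¬ pvFar (-y) 1000000 (-wmax) (fun t => -t.1) L := fun hf =>
          hside ⟨L, by rw [hkv]; rfl, hnc, Or.inr hf⟩
        rw [pvLf_char, pvRf_char, pvLower_eq y 1000000 wmin L hfl,
          pvUpper_eq y 1000000 wmax L hfh]
    · rw [if_neg h0, if_neg h1, if_neg h0, if_neg h1]

theorem getGrowLimitWithDoorOrWindowInWall_changed : Claim_changed_getGrowLimitWithDoorOrWindowInWall := by
  unfold Claim_changed_getGrowLimitWithDoorOrWindowInWall; decide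

theorem getGrowLimitWithDoorOrWindowInWall_tight : Claim_exact_getGrowLimitWithDoorOrWindowInWall := by
  intro x y dr direction wmin wmax hDom hPre hD heq
  unfold getGrowLimitWithDoorOrWindowInWall getGrowLimitWithDoorOrWindowInWall_alt at heq
  rcases hD with ⟨h0, hs⟩ | ⟨h1, hs⟩
  · obtain ⟨L, hkv⟩ := Option.isSome_iff_exists.mp (hPre.1 h0)
    rw [hkv] at hs
    obtain ⟨L', hmem, hnc, hfar⟩ := hs
    obtain rfl : L = L' := by simpa [eq_comm] using hmem
    rw [if_pos h0, if_pos h0, hkv] at heq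
    have heq' : pvALoop x L 10000000 wmin 10000000 wmax = pvFlank x wmin wmax L := heq
    have hcf : L.any (fun t => decide (t.1 < x ∧ x < t.2)) = false := by
      apply Bool.eq_false_iff.mpr
      intro ha
      obtain ⟨t, ht, hcond⟩ := List.any_eq_true.mp ha
      have hcond' := of_decide_eq_true hcond
      rcases hnc t ht with h | h <;> omega
    rw [pvALoop_split] at heq'
    unfold pvFlank at heq'
    rw [if_neg (by rw [hcf]; simp), if_neg (by rw [hcf]; simp)] at heq'
    rw [pvLf_char, pvRf_char] at heq'
    obtain ⟨e1, e2⟩ := Prod.mk.injEq .. ▸ heq'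
    rcases hfar with hf | hf
    · obtain ⟨hA, hB⟩ := pvLower_far x 10000000 wmin L (by norm_num) hf
      exact hB (by rw [← e1, hA])
    · obtain ⟨hA, hB⟩ := pvUpper_far x 10000000 wmax L (by norm_num) hf
      exact hB (by rw [← e2, hA])
  · obtain ⟨L, hkv⟩ := Option.isSome_iff_exists.mp (hPre.2 h1)
    rw [hkv] at hs
    obtain ⟨L', hmem, hnc, hfar⟩ := hs
    obtain rfl : L = L' := by simpa [eq_comm] using hmem
    rw [if_neg (by rw [h1]; norm_num), if_pos h1, if_neg (by rw [h1]; norm_num), if_pos h1, hkv] at heq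
    have heq' : pvALoop y L 1000000 wmin 1000000 wmax = pvFlank y wmin wmax L := heq
    have hcf : L.any (fun t => decide (t.1 < y ∧ y < t.2)) = false := by
      apply Bool.eq_false_iff.mpr
      intro ha
      obtain ⟨t, ht, hcond⟩ := List.any_eq_true.mp ha
      have hcond' := of_decide_eq_true hcond
      rcases hnc t ht with h | h <;> omega
    rw [pvALoop_split] at heq'
    unfold pvFlank at heq'
    rw [if_neg (by rw [hcf]; simp), if_neg (by rw [hcf]; simp)] at heq'
    rw [pvLf_char, pvRf_char] at heq'
    obtain ⟨e1, e2⟩ := Prod.mk.injEq .. ▸ heq'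
    rcases hfar with hf | hf
    · obtain ⟨hA, hB⟩ := pvLower_far y 1000000 wmin L (by norm_num) hf
      exact hB (by rw [← e1, hA])
    · obtain ⟨hA, hB⟩ := pvUpper_far y 1000000 wmax L (by norm_num) hf
      exact hB (by rw [← e2, hA])
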